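-- pv_equiv track=rewrite | github.com/h8191/EE5160-Error-Control-Coding-IITM | github/functions.py | transpose_int_vector
-- ===== SOURCE A (Python) =====
-- def transpose_int_vector(A, n_cols_A):
--     '''Transpose (a vector of integers representation of) binary matrix'''
--     n_cols_B = n_rows_A = len(A)
--     n_rows_B = n_cols_A
--     B = [0] * n_rows_B
--     for j, jc in zip(range(n_cols_A), range(n_cols_A - 1, -1, -1)):
--         mask_col_A = 1 << jc
--         for i, ic in zip(range(n_rows_A), range(n_rows_A - 1, -1, -1)):
--             # B[indB][indA] = A[indA][indB] (or) B[j][i] = A[i][j]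
--             B[j] ^= ( (A[i] & mask_col_A) >> jc) << ic
--     return B
-- ===== SOURCE B (Python) =====
-- def transpose_int_vector(A, n_cols_A):
--     '''Transpose (a vector of integers representation of) binary matrix'''
--     # rev[k] accumulates the output row for bit position k (column n_cols_A-1-k),
--     # built by peeling each input row LSB-first and shift-or-ing into running
--     # accumulators; the answer is rev reversed.
--     rev = [0] * n_cols_A
--     for row in A:
--         for k in range(n_cols_A):
--             rev[k] = (rev[k] << 1) | (row & 1)
--             row >>= 1
--     return rev[::-1]
-- ===== Notes on version B (the rewrite author's own statement) =====
-- stated objective: alternative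
-- what changed: B swaps the loop nest: a single row-major pass that peels each row's bits LSB-first by repeated shift (no per-bit position masks), shift-or-ing into running accumulators kept in reversed column order, and reverses the accumulator list at the end, instead of A's column-major XOR placement of each bit at its final position in a mutable output vector.
import Mathlib
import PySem

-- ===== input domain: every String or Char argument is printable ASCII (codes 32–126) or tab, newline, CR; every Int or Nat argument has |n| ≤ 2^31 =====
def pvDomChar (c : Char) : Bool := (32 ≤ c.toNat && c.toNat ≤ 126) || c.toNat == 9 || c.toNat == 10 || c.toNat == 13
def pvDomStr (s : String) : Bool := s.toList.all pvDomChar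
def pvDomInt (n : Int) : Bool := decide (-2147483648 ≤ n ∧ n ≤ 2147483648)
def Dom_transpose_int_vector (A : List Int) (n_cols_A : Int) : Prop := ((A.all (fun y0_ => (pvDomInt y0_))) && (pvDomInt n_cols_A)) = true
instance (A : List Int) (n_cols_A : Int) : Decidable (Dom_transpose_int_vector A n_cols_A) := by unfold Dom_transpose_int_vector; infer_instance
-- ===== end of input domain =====

-- B swaps the loop nest: one row-major pass peeling each row's bits LSB-first by
-- repeated shift into running accumulators kept in reversed column order, reversed
-- at the end — instead of A's column-major XOR placement at final bit positions;
-- same exact values, objective: alternative.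

-- ===== PORT A =====
-- Loop indices j, jc, i, ic produced by range()/zip are nonnegative and in range,
-- so `.toNat`, `List.getD _ _ 0` and `List.set` are exact for Python's B[j] and A[i].
def transpose_int_vector (A : List Int) (n_cols_A : Int) : List Int :=
  let n_rows_A : Int := A.length
  ((PySem.List.pyRange 0 n_cols_A 1).zip (PySem.List.pyRange (n_cols_A - 1) (-1) (-1))).foldl
    (fun B jp =>
      let mask_col_A : Int := 1 <<< jp.2.toNat
      ((PySem.List.pyRange 0 n_rows_A 1).zip (PySem.List.pyRange (n_rows_A - 1) (-1) (-1))).foldl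
        (fun B ip =>
          B.set jp.1.toNat (PySem.Int.bxor (B.getD jp.1.toNat 0)
            ((PySem.Int.band (A.getD ip.1.toNat 0) mask_col_A >>> jp.2.toNat) <<< ip.2.toNat)))
        B)
    (List.replicate n_cols_A.toNat 0)

-- ===== PORT B =====
-- Follows Source B: outer fold over the rows; inner loop over range(n_cols_A) carries
-- the pair state (rev, row), peeling `row & 1` and `row >>= 1`; index k of the
-- range is nonnegative so `.toNat`/`set`/`getD _ _ 0` are exact; rev[::-1] is
-- List.reverse (PySem.List.slice?_none_none_neg_one).
def transpose_int_vector_alt (A : List Int) (n_cols_A : Int) : List Int :=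
  (A.foldl
    (fun rev row =>
      ((PySem.List.pyRange 0 n_cols_A 1).foldl
        (fun (s : List Int × Int) (k : Int) =>
          (s.1.set k.toNat (PySem.Int.bor ((s.1.getD k.toNat 0) <<< (1 : Nat)) (PySem.Int.band s.2 1)),
           s.2 >>> (1 : Nat)))
        (rev, row)).1)
    (List.replicate n_cols_A.toNat (0 : Int))).reverse

-- ===== PRECONDITION & SPEC =====
def Spec_transpose_int_vector (A : List Int) (n_cols_A : Int) (out : List Int) : Prop := out = transpose_int_vector_alt A n_cols_A
instance (A : List Int) (n_cols_A : Int) (out : List Int) : Decidable (Spec_transpose_int_vector A n_cols_A out) := by unfold Spec_transpose_int_vector; infer_instance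

-- ===== CLAIM (what is proved, stated in full; the proofs are below) =====
def Claim_equal_transpose_int_vector : Prop := ∀ (A : List Int) (n_cols_A : Int), Dom_transpose_int_vector A n_cols_A → Spec_transpose_int_vector A n_cols_A (transpose_int_vector A n_cols_A)

-- ===== LEMMAS AND PROOFS =====

-- two Nat bit-pattern facts: the combined operands have disjoint bits, so OR/XOR add.
lemma pv_or_two_mul (m : Nat) : 2 * m ||| 1 = 2 * m + 1 := by
  have h := Nat.two_pow_add_eq_or_of_lt (i := 1) (b := 1) (by norm_num) m
  norm_num at h
  omega

lemma pv_xor_pow (m k : Nat) : m * 2 ^ (k + 1) ^^^ 2 ^ k = m * 2 ^ (k + 1) + 2 ^ k := by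
  have hor : m * 2 ^ (k + 1) ^^^ 2 ^ k = m * 2 ^ (k + 1) ||| 2 ^ k := by
    apply Nat.eq_of_testBit_eq
    intro i
    simp only [Nat.testBit_xor, Nat.testBit_or, Nat.testBit_mul_two_pow, Nat.testBit_two_pow]
    by_cases h : k = i
    · subst h
      simp
    · simp [h]
  rw [hor, Nat.mul_comm, ← Nat.two_pow_add_eq_or_of_lt
    (Nat.pow_lt_pow_right one_lt_two (Nat.lt_succ_self k)) m, Nat.mul_comm]

-- one packing step, on Nat: XOR-ing a fresh bit below the accumulated prefix
-- is the same as shifting the prefix up and OR-ing the bit in.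
lemma pv_key_nat (mm kk bb : Nat) (hbb : bb = 0 ∨ bb = 1) :
    (mm <<< (kk + 1)) ^^^ (bb <<< kk) = ((mm <<< 1) ||| bb) <<< kk := by
  rcases hbb with rfl | rfl
  · simp [Nat.shiftLeft_eq, pow_succ]
    ring
  · simp only [Nat.shiftLeft_eq, one_mul]
    rw [pv_xor_pow, Nat.mul_comm mm 2, pv_or_two_mul]
    ring

-- extracting bit c of an Int: A's mask-then-shift form = B's shift-then-mask form
-- (two's complement, as in Python).
lemma pv_bit_eq (x : Int) (c : Nat) :
    ((PySem.Int.band x (((1 <<< c : Nat) : Int))) : Int) >>> c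
    = PySem.Int.band (x >>> c) 1 := by
  have hnat : ∀ n : Nat, (n &&& (1 <<< c)) >>> c = (n >>> c) &&& 1 := by
    intro n
    rw [Nat.shiftLeft_eq, one_mul, Nat.and_two_pow, Nat.shiftRight_eq_div_pow,
      Nat.shiftRight_eq_div_pow, Nat.and_one_is_mod,
      Nat.mul_div_cancel _ (pow_pos (by norm_num) c), Nat.testBit_eq_decide_div_mod_eq]
    rcases Nat.mod_two_eq_zero_or_one (n / 2 ^ c) with h | h <;> simp [h]
  cases x with
  | ofNat n =>
    rw [show (Int.ofNat n) = ((n : Nat) : Int) from rfl, PySem.Int.band_natCast,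
      ← Int.natCast_shiftRight, ← Int.natCast_shiftRight,
      show (1 : Int) = ((1 : Nat) : Int) from rfl, PySem.Int.band_natCast]
    exact_mod_cast hnat n
  | negSucc n =>
    have hgen : ∀ m : Nat, PySem.Int.band (Int.negSucc n) (m : Int)
        = ((m - (m &&& n) : Nat) : Int) := by
      intro m
      simp [PySem.Int.band]
    have hR : PySem.Int.band (Int.negSucc n >>> c) 1
        = ((1 - ((n >>> c) &&& 1) : Nat) : Int) := by
      show PySem.Int.band (Int.negSucc (n >>> c)) 1 = _
      simp [PySem.Int.band, Nat.and_comm, -Int.natCast_shiftRight, Int.toNat_natCast]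
    rw [hgen, hR, ← Int.natCast_shiftRight]
    norm_cast
    rw [Nat.shiftLeft_eq, one_mul, Nat.and_comm, Nat.and_two_pow, Nat.and_one_is_mod,
      Nat.shiftRight_eq_div_pow, Nat.shiftRight_eq_div_pow,
      Nat.testBit_eq_decide_div_mod_eq]
    rcases Nat.mod_two_eq_zero_or_one (n / 2 ^ c) with h | h <;>
      simp [h, Nat.div_self (pow_pos (by norm_num : (0 : Nat) < 2) c)]

-- the value of an extracted bit is 0 or 1.
lemma pv_bit01 (x : Int) (c : Nat) :
    PySem.Int.band (x >>> c) 1 = 0 ∨ PySem.Int.band (x >>> c) 1 = 1 := by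
  rw [PySem.Int.band_one]
  have h1 := PySem.Int.mod_nonneg (x >>> c) (b := 2) (by omega)
  have h2 := PySem.Int.mod_lt (x >>> c) (b := 2) (by omega)
  omega

-- A's inner accumulator, abstracted: XOR the bits in at descending positions.
def pvPackA : Int → List Int → Int
  | w, [] => w
  | w, b :: t => pvPackA (PySem.Int.bxor w (b <<< t.length)) t

-- XOR-placing bits at descending positions = MSB-first shift-or packing (B's fold).
lemma pv_pack_eq : ∀ (bs : List Int) (v : Int), 0 ≤ v → (∀ b ∈ bs, b = 0 ∨ b = 1) →
    pvPackA (v <<< bs.length) bs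
    = bs.foldl (fun v b => PySem.Int.bor (v <<< (1 : Nat)) b) v := by
  intro bs
  induction bs with
  | nil => intro v hv _; simp [pvPackA]
  | cons b t ih =>
    intro v hv hb
    obtain ⟨m, rfl⟩ := Int.eq_ofNat_of_zero_le hv
    have hstep : ∀ bb : Nat, bb = 0 ∨ bb = 1 →
        PySem.Int.bxor ((m : Int) <<< (t.length + 1)) ((bb : Int) <<< t.length)
        = (PySem.Int.bor ((m : Int) <<< (1 : Nat)) (bb : Int)) <<< t.length := by
      intro bb hbb
      rw [← Int.natCast_shiftLeft m (t.length + 1), ← Int.natCast_shiftLeft bb t.length,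
        PySem.Int.bxor_natCast, ← Int.natCast_shiftLeft m 1, PySem.Int.bor_natCast,
        ← Int.natCast_shiftLeft, pv_key_nat m t.length bb hbb]
    show pvPackA (PySem.Int.bxor ((m : Int) <<< (t.length + 1)) (b <<< t.length)) t = _
    have hv' : 0 ≤ PySem.Int.bor ((m : Int) <<< (1 : Nat)) b := by
      rcases hb b (by simp) with rfl | rfl
      · rw [PySem.Int.bor_zero, ← Int.natCast_shiftLeft]
        exact Int.natCast_nonneg _
      · rw [PySem.Int.bor_of_nonneg (by rw [← Int.natCast_shiftLeft]; exact Int.natCast_nonneg _)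
          (by norm_num)]
        exact Int.natCast_nonneg _
    have hrec := ih _ hv' (fun x hx => hb x (by simp [hx]))
    rcases hb b (by simp) with rfl | rfl
    · have h0 := hstep 0 (Or.inl rfl)
      push_cast at h0
      rw [h0, hrec]
      simp only [List.foldl_cons]
    · have h1 := hstep 1 (Or.inr rfl)
      push_cast at h1
      rw [h1, hrec]
      simp only [List.foldl_cons]

-- fold over `range` placing bs[k] at position len-1-k = pvPackA.
lemma pv_range_fold_packA : ∀ (bs : List Int) (w : Int),
    (List.range bs.length).foldl
      (fun v k => PySem.Int.bxor v ((bs.getD k 0) <<< (bs.length - 1 - k))) w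
    = pvPackA w bs := by
  intro bs
  induction bs with
  | nil => intro w; simp [pvPackA]
  | cons b t ih =>
    intro w
    rw [show (b :: t).length = t.length + 1 from rfl, List.range_succ_eq_map]
    simp only [List.foldl_cons, List.foldl_map]
    calc (List.range t.length).foldl
          (fun v k => PySem.Int.bxor v ((b :: t).getD (k + 1) 0 <<< (t.length + 1 - 1 - (k + 1))))
          (PySem.Int.bxor w ((b :: t).getD 0 0 <<< (t.length + 1 - 1 - 0)))
        = (List.range t.length).foldl
          (fun v k => PySem.Int.bxor v (t.getD k 0 <<< (t.length - 1 - k)))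
          (PySem.Int.bxor w (b <<< t.length)) := by
          congr 1
          funext v k
          congr 2
          omega
      _ = pvPackA (PySem.Int.bxor w (b <<< t.length)) t := ih _
      _ = pvPackA w (b :: t) := rfl

-- read-modify-write at one fixed index collapses to a single set of a fold.
lemma pv_foldl_set_getD {α : Type} (l : List α) (t : α → Int) (j : Nat) :
    ∀ B : List Int, j < B.length →
    l.foldl (fun B x => B.set j (PySem.Int.bxor (B.getD j 0) (t x))) B
    = B.set j (l.foldl (fun v x => PySem.Int.bxor v (t x)) (B.getD j 0)) := by
  induction l with
  | nil =>
    intro B hj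
    simp only [List.foldl_nil]
    rw [List.getD, List.getElem?_eq_getElem hj]
    exact (List.set_getElem_self hj).symm
  | cons x xs ih =>
    intro B hj
    simp only [List.foldl_cons]
    rw [ih _ (by simpa using hj), List.set_set]
    congr 1
    rw [List.getD, List.getElem?_set_self (by simpa using hj)]
    rfl

-- a left-to-right sweep of independent per-index updates is a map.
lemma pv_fold_set_range (g : Nat → Int → Int) (body : List Int → Nat → List Int)
    (hbody : ∀ C j, j < C.length → body C j = C.set j (g j (C.getD j 0))) :
    ∀ (k a : Nat) (B : List Int), a + k = B.length →
    (List.range' a k).foldl body B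
    = B.take a ++ (List.range' a k).map (fun j => g j (B.getD j 0)) := by
  intro k
  induction k with
  | zero =>
    intro a B hlen
    have h : B.take a = B := List.take_of_length_le (by omega)
    simp [h]
  | succ k ih =>
    intro a B hlen
    have ha : a < B.length := by omega
    rw [List.range'_succ, List.foldl_cons, List.map_cons, hbody B a ha]
    set B' := B.set a (g a (B.getD a 0)) with hB'
    have hlen' : (a + 1) + k = B'.length := by simp [hB']; omega
    rw [ih (a + 1) B' hlen']
    have htake : B'.take (a + 1) = B.take a ++ [g a (B.getD a 0)] := by
      rw [hB', List.take_set, List.take_add_one, List.getElem?_eq_getElem ha]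
      simp only [Option.toList_some]
      rw [List.set_append_right _ _ (by simp [Nat.min_eq_left (Nat.le_of_lt ha)])]
      simp [Nat.min_eq_left (Nat.le_of_lt ha)]
    have hgd : ∀ j ∈ List.range' (a + 1) k, g j (B'.getD j 0) = g j (B.getD j 0) := by
      intro j hji
      have hj1 : a + 1 ≤ j := (List.mem_range'_1.mp hji).1
      rw [hB']
      simp only [List.getD]
      rw [List.getElem?_set_ne (by omega)]
    rw [htake, List.append_assoc, List.map_congr_left hgd]
    simp

-- the inner (row) loop of A, for column shift c, equals the shift-or packing of
-- the column's bits extracted MSB-first (first row = most significant).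
lemma pv_inner_eq (A : List Int) (c : Nat) :
    ((PySem.List.pyRange 0 (A.length : Int) 1).zip
        (PySem.List.pyRange ((A.length : Int) - 1) (-1) (-1))).foldl
      (fun v ip =>
        PySem.Int.bxor v
          ((((PySem.Int.band (A.getD ip.1.toNat 0) (((1 <<< c : Nat) : Int))) : Int)
              >>> ((c : Nat) : Int) : Int) <<< ((ip.2.toNat : Nat) : Int))) 0
    = (A.map (fun row : Int => PySem.Int.band (row >>> c) 1)).foldl
        (fun v b => PySem.Int.bor (v <<< (1 : Nat)) b) 0 := by
  simp only [Int.shiftRight_natCast_right, Int.shiftLeft_natCast_right]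
  set r := A.length with hr
  set bs := A.map (fun row : Int => PySem.Int.band (row >>> c) 1) with hbs
  have hlen : bs.length = r := by rw [hbs, List.length_map]
  have h1 : PySem.List.pyRange 0 (r : Int) 1
      = (List.range r).map (fun (k : Nat) => (k : Int)) := by
    rw [PySem.List.pyRange_zero, Int.toNat_natCast]
  have h2 : PySem.List.pyRange ((r : Int) - 1) (-1) (-1)
      = (List.range r).map (fun (k : Nat) => (r : Int) - 1 - (k : Int)) := by
    have h3 : ((r : Int) - 1 - (-1)).toNat = r := by omega
    rw [PySem.List.pyRange_neg_one, h3]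
  rw [h1, h2, List.zip_map', List.foldl_map]
  trans ((List.range r).foldl
      (fun (v : Int) (k : Nat) => PySem.Int.bxor v ((bs.getD k 0) <<< (bs.length - 1 - k))) 0)
  · apply PySem.List.foldl_congr_mem
    intro acc k hk
    dsimp only
    have hkr : k < r := List.mem_range.mp hk
    congr 1
    rw [pv_bit_eq]
    have e2 : ((r : Int) - 1 - (k : Int)).toNat = bs.length - 1 - k := by
      rw [hlen]; omega
    rw [Int.toNat_natCast, e2]
    congr 1
    rw [hbs, List.getD_eq_getElem _ _ (by simpa using hkr)]
    simp [List.getElem?_eq_getElem hkr]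
  · have hbits : ∀ b ∈ bs, b = 0 ∨ b = 1 := by
      intro b hb
      rw [hbs] at hb
      obtain ⟨row, _, rfl⟩ := List.mem_map.mp hb
      exact pv_bit01 row c
    have hzero : (0 : Int) = (0 : Int) <<< bs.length := by
      rw [show (0 : Int) = ((0 : Nat) : Int) from rfl, ← Int.natCast_shiftLeft]
      simp
    rw [← hlen, pv_range_fold_packA]
    conv_lhs => rw [hzero]
    rw [pv_pack_eq bs 0 le_rfl hbits]

-- B's inner peel loop: after sweeping indices range' a m, slot k holds the old
-- value shifted up with bit (k - a) of row or-ed in, and row is shifted by m.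
lemma pv_peel : ∀ (m a : Nat) (rev : List Int) (row : Int), a + m = rev.length →
    (List.range' a m).foldl
      (fun (s : List Int × Int) (k : Nat) =>
        (s.1.set k (PySem.Int.bor ((s.1.getD k 0) <<< (1 : Nat)) (PySem.Int.band s.2 1)),
         s.2 >>> (1 : Nat)))
      (rev, row)
    = (rev.take a ++ (List.range' a m).map
        (fun k => PySem.Int.bor ((rev.getD k 0) <<< (1 : Nat)) (PySem.Int.band (row >>> (k - a)) 1)),
       row >>> m) := by
  intro m
  induction m with
  | zero =>
    intro a rev row hlen
    simp [List.take_of_length_le (by omega : rev.length ≤ a)]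
  | succ m ih =>
    intro a rev row hlen
    have ha : a < rev.length := by omega
    rw [List.range'_succ, List.foldl_cons]
    set rev' := rev.set a (PySem.Int.bor ((rev.getD a 0) <<< (1 : Nat)) (PySem.Int.band row 1))
      with hrev'
    have hlen' : (a + 1) + m = rev'.length := by simp [hrev']; omega
    rw [ih (a + 1) rev' (row >>> (1 : Nat)) hlen']
    have htake : rev'.take (a + 1)
        = rev.take a ++ [PySem.Int.bor ((rev.getD a 0) <<< (1 : Nat)) (PySem.Int.band row 1)] := by
      rw [hrev', List.take_set, List.take_add_one, List.getElem?_eq_getElem ha]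
      simp only [Option.toList_some]
      rw [List.set_append_right _ _ (by simp [Nat.min_eq_left (Nat.le_of_lt ha)])]
      simp [Nat.min_eq_left (Nat.le_of_lt ha)]
    have hmap : (List.range' (a + 1) m).map
        (fun k => PySem.Int.bor ((rev'.getD k 0) <<< (1 : Nat))
          (PySem.Int.band ((row >>> (1 : Nat)) >>> (k - (a + 1))) 1))
        = (List.range' (a + 1) m).map
        (fun k => PySem.Int.bor ((rev.getD k 0) <<< (1 : Nat))
          (PySem.Int.band (row >>> (k - a)) 1)) := by
      apply List.map_congr_left
      intro k hki
      have hk1 : a + 1 ≤ k := (List.mem_range'_1.mp hki).1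
      have hgd : rev'.getD k 0 = rev.getD k 0 := by
        rw [hrev']
        simp only [List.getD]
        rw [List.getElem?_set_ne (by omega)]
      have hsh : (row >>> (1 : Nat)) >>> (k - (a + 1)) = row >>> (k - a) := by
        rw [← Int.shiftRight_add]
        congr 1
        omega
      rw [hgd, hsh]
    have hrow : (row >>> (1 : Nat)) >>> m = row >>> (m + 1) := by
      rw [← Int.shiftRight_add]
      congr 1
      omega
    rw [htake, hmap, hrow, List.map_cons, List.append_assoc]
    simp [Int.shiftRight_zero]

-- B's outer fold over the rows, with the state abstracted as a map over range m:
-- slot k accumulates the shift-or fold of column-k bits (LSB-first position k).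
lemma pv_outer (n : Int) (m : Nat) (hm : n.toNat = m) :
    ∀ (A : List Int) (f : Nat → Int),
    A.foldl
      (fun rev row =>
        ((PySem.List.pyRange 0 n 1).foldl
          (fun (s : List Int × Int) (k : Int) =>
            (s.1.set k.toNat (PySem.Int.bor ((s.1.getD k.toNat 0) <<< (1 : Nat)) (PySem.Int.band s.2 1)),
             s.2 >>> (1 : Nat)))
          (rev, row)).1)
      ((List.range m).map f)
    = (List.range m).map (fun (k : Nat) =>
        (A.map (fun row : Int => PySem.Int.band (row >>> k) 1)).foldl
          (fun v b => PySem.Int.bor (v <<< (1 : Nat)) b) (f k)) := by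
  intro A
  induction A with
  | nil =>
    intro f
    simp
  | cons row rest ih =>
    intro f
    rw [List.foldl_cons]
    have hpy : PySem.List.pyRange 0 n 1 = (List.range m).map (fun (k : Nat) => (k : Int)) := by
      rw [PySem.List.pyRange_zero, hm]
    have hbody :
        ((PySem.List.pyRange 0 n 1).foldl
          (fun (s : List Int × Int) (k : Int) =>
            (s.1.set k.toNat (PySem.Int.bor ((s.1.getD k.toNat 0) <<< (1 : Nat)) (PySem.Int.band s.2 1)),
             s.2 >>> (1 : Nat)))
          ((List.range m).map f, row)).1
        = (List.range m).map
          (fun k => PySem.Int.bor ((f k) <<< (1 : Nat)) (PySem.Int.band (row >>> k) 1)) := by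
      rw [hpy, List.foldl_map]
      simp only [Int.toNat_natCast]
      rw [List.range_eq_range',
        pv_peel m 0 ((List.range' 0 m).map f) row (by simp)]
      simp only [List.take_zero, List.nil_append]
      apply List.map_congr_left
      intro k hki
      have hkm : k < m := by
        have := (List.mem_range'_1.mp hki).2
        omega
      have hgd : ((List.range' 0 m).map f).getD k 0 = f k := by
        rw [List.getD_eq_getElem _ _ (by simpa using hkm)]
        simp [List.getElem_range']
      rw [hgd, Nat.sub_zero]
    rw [hbody, ih]
    apply List.map_congr_left
    intro k _
    simp only [List.map_cons, List.foldl_cons]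

-- ===== VERDICT (by name: the statement is the Claim_ definition above) =====
theorem transpose_int_vector_spec : Claim_equal_transpose_int_vector := by
  unfold Claim_equal_transpose_int_vector Spec_transpose_int_vector
  intro A n _
  by_cases hn : n ≤ 0
  · have hnil : List.replicate n.toNat (0 : Int) = [] := by
      simp [Int.toNat_of_nonpos hn]
    have hB : transpose_int_vector_alt A n = [] := by
      unfold transpose_int_vector_alt
      rw [hnil, PySem.List.pyRange_one_eq_nil hn]
      have : ∀ (l : List Int), l.foldl
          (fun (rev : List Int) (row : Int) =>
            (([] : List Int).foldl
              (fun (s : List Int × Int) (k : Int) =>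
                (s.1.set k.toNat (PySem.Int.bor ((s.1.getD k.toNat 0) <<< (1 : Nat)) (PySem.Int.band s.2 1)),
                 s.2 >>> (1 : Nat)))
              (rev, row)).1)
          ([] : List Int) = [] := by
        intro l
        induction l with
        | nil => rfl
        | cons x xs _ => simp
      rw [this]
      rfl
    rw [hB]
    simp [transpose_int_vector, PySem.List.pyRange_one_eq_nil hn,
      PySem.List.pyRange_neg_one_eq_nil (by omega : n - 1 ≤ -1), Int.toNat_of_nonpos hn]
  · rw [not_le] at hn
    set m := n.toNat with hm
    have hrange : (n - 1 - (-1)).toNat = m := by omega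
    -- B side: reversed list of LSB-first packed columns
    have hB : transpose_int_vector_alt A n
        = ((List.range m).map (fun (k : Nat) =>
            (A.map (fun row : Int => PySem.Int.band (row >>> k) 1)).foldl
              (fun v b => PySem.Int.bor (v <<< (1 : Nat)) b) 0)).reverse := by
      unfold transpose_int_vector_alt
      have hrepl : List.replicate n.toNat (0 : Int) = (List.range m).map (fun _ => (0 : Int)) := by
        rw [← hm]
        simp [List.map_const']
      rw [hrepl, pv_outer n m hm.symm A (fun _ => 0)]
    -- A side: collapse the outer sweep into a map of inner folds
    have h1 : PySem.List.pyRange 0 n 1 = (List.range m).map (fun (k : Nat) => (k : Int)) := by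
      rw [PySem.List.pyRange_zero]
    have h2 : PySem.List.pyRange (n - 1) (-1) (-1)
        = (List.range m).map (fun (k : Nat) => n - 1 - (k : Int)) := by
      rw [PySem.List.pyRange_neg_one, hrange]
    have hA : transpose_int_vector A n
        = (List.range m).map (fun (j : Nat) =>
            ((PySem.List.pyRange 0 (A.length : Int) 1).zip
                (PySem.List.pyRange ((A.length : Int) - 1) (-1) (-1))).foldl
              (fun v ip =>
                PySem.Int.bxor v
                  ((((PySem.Int.band (A.getD ip.1.toNat 0)
                        (((1 <<< (n - 1 - (j : Int)).toNat : Nat) : Int))) : Int)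
                      >>> (((n - 1 - (j : Int)).toNat : Nat) : Int) : Int)
                    <<< ((ip.2.toNat : Nat) : Int))) 0) := by
      simp only [transpose_int_vector]
      rw [h1, h2, List.zip_map', List.foldl_map, List.range_eq_range']
      rw [pv_fold_set_range
        (body := _)
        (g := fun (j : Nat) (v0 : Int) =>
          ((PySem.List.pyRange 0 (A.length : Int) 1).zip
              (PySem.List.pyRange ((A.length : Int) - 1) (-1) (-1))).foldl
            (fun v ip =>
              PySem.Int.bxor v
                ((((PySem.Int.band (A.getD ip.1.toNat 0)
                      (((1 <<< (n - 1 - (j : Int)).toNat : Nat) : Int))) : Int)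
                    >>> (((n - 1 - (j : Int)).toNat : Nat) : Int) : Int)
                  <<< ((ip.2.toNat : Nat) : Int))) v0)
        (hbody := by
          intro C j hj
          dsimp only
          simp only [Int.toNat_natCast]
          exact pv_foldl_set_getD _ _ j C hj)
        m 0 (List.replicate n.toNat 0) (by simp [hm])]
      rw [List.take_zero, List.nil_append, ← List.range_eq_range']
      apply List.map_congr_left
      intro j _
      congr 1
      simp [List.getD, List.getElem?_replicate]
      split <;> rfl
    rw [hA, hB]
    -- reverse of an m-range map is the m-range map at m-1-j
    rw [← List.map_reverse, List.range_eq_range', List.reverse_range', ← List.range_eq_range',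
      List.map_map]
    apply List.map_congr_left
    intro j hj
    have hjm : j < m := List.mem_range.mp hj
    have hc : (n - 1 - (j : Int)).toNat = m - 1 - j := by omega
    simp only [Function.comp]
    rw [show 0 + m - 1 - j = m - 1 - j by omega, ← hc]
    exact pv_inner_eq A ((n - 1 - (j : Int)).toNat)
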